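-- pv_equiv track=rewrite | github.com/PennWhartonBudgetModel/Py-Dynamic-OLG | scenarioModule.py | compactifyTag
-- ===== SOURCE A (Python) =====
-- def compactifyTag( tag ):
--
--     TAG_SIZE    = 80
--     # Allow chars ASCII 65-90 and 97-122 only
--     # Remap ones that fall between into numbers (0-6)
--     MIN_CHAR1   = 65
--     MAX_CHAR1   = 90
--     MIN_CHAR2   = 97
--     MAX_CHAR2   = 122
--     CHAR0       = 48
--     newtag      = list(tag[0:min(len(tag), TAG_SIZE)])
--     for i in range(TAG_SIZE - 1, len(tag)):
--         d = (i + 1) % (TAG_SIZE)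
--         c = (ord(newtag[d]) + ord(tag[i])) % (MAX_CHAR2 - MIN_CHAR1) + MIN_CHAR1
--         if (c > MAX_CHAR1) and (c < MIN_CHAR2) :
--             c = c - (MAX_CHAR1 - CHAR0)
--
--         newtag[d] = chr(c)
--
--     newtag = "".join(newtag)
--     return newtag
-- ===== SOURCE B (Python) =====
-- def compactifyTag(tag):
--     # Per-output-position fold: position d absorbs exactly the source indices
--     # i >= 79 with (i+1) % 80 == d, in increasing order, independently of other positions.
--     n = len(tag)
--     out = []
--     for d in range(min(n, 80)):
--         c = ord(tag[d])
--         i = 79 if d == 0 else d + 79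
--         while i < n:
--             c = (c + ord(tag[i])) % 57 + 65
--             if 90 < c < 97:
--                 c -= 42
--             i += 80
--         out.append(chr(c))
--     return "".join(out)
-- ===== Notes on version B (the rewrite author's own statement) =====
-- stated objective: alternative
-- what changed: B replaces A's single sequential scan that folds tag[i] into a mutated 80-slot buffer at position (i+1)%80 with an independent per-output-position computation: for each position d it folds, in increasing order, exactly the source indices of d's residue class (i = 79 or d+79, then +80 steps) into a running code and emits the character directly, with no buffer mutation.
import Mathlib
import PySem

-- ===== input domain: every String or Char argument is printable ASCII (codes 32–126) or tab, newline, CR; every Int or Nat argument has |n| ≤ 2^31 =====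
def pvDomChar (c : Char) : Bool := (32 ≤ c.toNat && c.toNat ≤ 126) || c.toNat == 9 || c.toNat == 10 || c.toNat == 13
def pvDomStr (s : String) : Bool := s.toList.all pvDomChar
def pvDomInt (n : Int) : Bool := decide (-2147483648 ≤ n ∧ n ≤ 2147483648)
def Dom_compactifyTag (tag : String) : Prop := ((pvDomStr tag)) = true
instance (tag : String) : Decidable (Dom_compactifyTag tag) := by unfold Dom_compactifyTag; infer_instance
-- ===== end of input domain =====

-- B regroups A's single sequential 80-cyclic scan into an independent per-output-position
-- fold over that position's residue class of source indices (objective: alternative).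

-- ===== PORT A =====
-- One loop iteration of A: fold tag[i] into newtag[(i+1) % 80].
-- Indices d and i are always in range in A, so getD is exact here.
def pvFoldA (tl : List Char) (nt : List Char) (i : Nat) : List Char :=
  let d := (i + 1) % 80
  let c := ((nt.getD d ' ').toNat + (tl.getD i ' ').toNat) % (122 - 65) + 65
  let c := if 90 < c ∧ c < 97 then c - (90 - 48) else c
  nt.set d (Char.ofNat c)

def compactifyTag (tag : String) : String :=
  let tl := tag.toList
  let newtag := tl.take (min tl.length 80)
  -- range(80 - 1, len(tag)) rendered as range' 79 (len - 79)
  String.ofList ((List.range' 79 (tl.length - 79)).foldl (pvFoldA tl) newtag)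

-- ===== PORT B =====
-- One step of B's inner while-loop: absorb tag[i] into the running code c.
def pvAcc (tl : List Char) (c : Nat) (i : Nat) : Nat :=
  let c := (c + (tl.getD i ' ').toNat) % 57 + 65
  if 90 < c ∧ c < 97 then c - 42 else c

-- The output character at position d: fold over i = start, start+80, … < len(tag);
-- the while-loop 'i += 80 while i < n' is rendered as range' start ⌈(n-start)/80⌉ 80.
def pvCol (tl : List Char) (d : Nat) : Char :=
  let start := if d = 0 then 79 else d + 79
  Char.ofNat ((List.range' start ((tl.length - start + 79) / 80) 80).foldl
    (pvAcc tl) (tl.getD d ' ').toNat)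

def compactifyTag_alt (tag : String) : String :=
  let tl := tag.toList
  String.ofList ((List.range (min tl.length 80)).map (pvCol tl))

-- ===== PRECONDITION & SPEC =====
def Spec_compactifyTag (tag : String) (out : String) : Prop := out = compactifyTag_alt tag
instance (tag : String) (out : String) : Decidable (Spec_compactifyTag tag out) := by unfold Spec_compactifyTag; infer_instance

-- ===== CLAIM (what is proved, stated in full; the proofs are below) =====
def Claim_equal_compactifyTag : Prop := ∀ (tag : String), Dom_compactifyTag tag → Spec_compactifyTag tag (compactifyTag tag)

-- ===== LEMMAS AND PROOFS =====

-- one pvAcc step always lands in [48, 121]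
theorem pvAcc_le (tl : List Char) (c i : Nat) : pvAcc tl c i ≤ 121 := by
  have h := Nat.mod_lt (x := c + (tl.getD i ' ').toNat) (y := 57) (by norm_num)
  unfold pvAcc
  dsimp only
  split <;> omega

-- folding pvAcc preserves validity of the running codepoint
theorem foldl_pvAcc_valid (tl : List Char) (l : List Nat) (c : Nat)
    (h : Nat.isValidChar c) : Nat.isValidChar (l.foldl (pvAcc tl) c) := by
  induction l generalizing c with
  | nil => exact h
  | cons x xs ih =>
      refine ih _ ?_
      exact Or.inl (by have := pvAcc_le tl c x; omega)

theorem char_toNat_valid (c : Char) : Nat.isValidChar c.toNat := c.valid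

theorem toNat_ofNat_valid (n : Nat) (h : Nat.isValidChar n) :
    (Char.ofNat n).toNat = n := by
  rw [Char.toNat_ofNat, if_pos h]

-- the residue class of output position d inside range(79, 79+m)
theorem filter_range'_residue (d : Nat) (hd : d < 80) (m : Nat) :
    (List.range' 79 m).filter (fun i => (i + 1) % 80 == d) =
      List.range' (if d = 0 then 79 else d + 79)
        ((m + 79 - (if d = 0 then 0 else d)) / 80) 80 := by
  induction m with
  | zero =>
      simp only [List.range', List.filter_nil]
      have : (0 + 79 - (if d = 0 then 0 else d)) / 80 = 0 := by split <;> omega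
      rw [this]
      rfl
  | succ m ih =>
      rw [List.range'_concat, List.filter_append, ih]
      simp only [List.filter_cons, List.filter_nil]
      by_cases hmd : m % 80 = d
      · have hpred : ((79 + 1 * m + 1) % 80 == d) = true := by
          simp only [beq_iff_eq]; omega
        rw [hpred]
        simp only [if_true]
        have hq : (m + 1 + 79 - (if d = 0 then 0 else d)) / 80 =
            (m + 79 - (if d = 0 then 0 else d)) / 80 + 1 := by
          split <;> omega
        rw [hq, List.range'_concat]
        congr 2
        split <;> omega
      · have hpred : ((79 + 1 * m + 1) % 80 == d) = false := by
          simp only [beq_eq_false_iff_ne, ne_eq]; omega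
        rw [hpred]
        simp only [Bool.false_eq_true, if_false, List.append_nil]
        congr 1
        split <;> omega

-- A's fold preserves the buffer length
theorem foldl_pvFoldA_length (tl : List Char) (l : List Nat) (nt : List Char) :
    (l.foldl (pvFoldA tl) nt).length = nt.length := by
  induction l generalizing nt with
  | nil => rfl
  | cons x xs ih => rw [List.foldl_cons, ih]; simp [pvFoldA]

-- main invariant: after A's flat scan over range(79, 79+m), position d holds
-- exactly the per-residue-class fold that B computes
theorem foldA_getD (tl : List Char) (m : Nat) (nt : List Char)
    (hlen : nt.length = 80) (d : Nat) (_hd : d < 80) :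
    ((List.range' 79 m).foldl (pvFoldA tl) nt).getD d ' ' =
      Char.ofNat (((List.range' 79 m).filter (fun i => (i + 1) % 80 == d)).foldl
        (pvAcc tl) ((nt.getD d ' ').toNat)) := by
  induction m with
  | zero =>
      simp only [List.range', List.foldl_nil, List.filter_nil]
      exact (Char.ofNat_toNat (nt.getD d ' ')).symm
  | succ m ih =>
      rw [List.range'_concat, List.foldl_append, List.filter_append, List.foldl_append]
      set N := (List.range' 79 m).foldl (pvFoldA tl) nt with hN
      have hNlen : N.length = 80 := by rw [hN, foldl_pvFoldA_length, hlen]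
      have hidx : (79 + 1 * m + 1) % 80 = m % 80 := by omega
      simp only [List.foldl_cons, List.foldl_nil, List.filter_cons, List.filter_nil]
      by_cases hmd : m % 80 = d
      · have hpred : ((79 + 1 * m + 1) % 80 == d) = true := by
          simp only [beq_iff_eq]; omega
        rw [hpred]
        simp only [if_true, List.foldl_cons, List.foldl_nil]
        have hset : (pvFoldA tl N (79 + 1 * m)).getD d ' ' =
            Char.ofNat (pvAcc tl ((N.getD d ' ').toNat) (79 + 1 * m)) := by
          unfold pvFoldA
          dsimp only
          rw [List.getD_eq_getElem?_getD, hidx, hmd, List.getElem?_set_self (by omega)]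
          simp [pvAcc]
        rw [hset, ih]
        congr 1
        have hF : Nat.isValidChar
            (((List.range' 79 m).filter (fun i => (i + 1) % 80 == d)).foldl
              (pvAcc tl) ((nt.getD d ' ').toNat)) :=
          foldl_pvAcc_valid _ _ _ (char_toNat_valid _)
        rw [toNat_ofNat_valid _ hF]
      · have hpred : ((79 + 1 * m + 1) % 80 == d) = false := by
          simp only [beq_eq_false_iff_ne, ne_eq]; omega
        rw [hpred]
        simp only [Bool.false_eq_true, if_false, List.foldl_nil]
        have hne : (pvFoldA tl N (79 + 1 * m)).getD d ' ' = N.getD d ' ' := by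
          unfold pvFoldA
          rw [List.getD_eq_getElem?_getD, List.getElem?_set_ne (by omega),
            ← List.getD_eq_getElem?_getD]
        rw [hne, ih]

-- the two per-position source lists have the same count
theorem count_eq (n d : Nat) (hd : d < 80) (hn : 80 ≤ n) :
    (n - 79 + 79 - (if d = 0 then 0 else d)) / 80 =
      (n - (if d = 0 then 79 else d + 79) + 79) / 80 := by
  split <;> omega

theorem lists_eq (tag : String) :
    ((List.range' 79 (tag.toList.length - 79)).foldl (pvFoldA tag.toList)
        (tag.toList.take (min tag.toList.length 80))) =
      (List.range (min tag.toList.length 80)).map (pvCol tag.toList) := by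
  set tl := tag.toList
  set n := tl.length with hn
  apply List.ext_getElem
  · rw [foldl_pvFoldA_length, List.length_take, List.length_map, List.length_range]
    omega
  · intro d h1 h2
    have hdlt : d < min n 80 := by
      rw [List.length_map, List.length_range] at h2; exact h2
    rw [List.getElem_map, List.getElem_range, ← List.getD_eq_getElem _ ' ' h1]
    by_cases hbig : 80 ≤ n
    · have hd80 : d < 80 := by omega
      have hlen : (tl.take (min n 80)).length = 80 := by rw [List.length_take]; omega
      rw [foldA_getD tl (n - 79) _ hlen d hd80, filter_range'_residue d hd80]
      unfold pvCol
      dsimp only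
      have htake : ((tl.take (min n 80)).getD d ' ') = tl.getD d ' ' := by
        have h3 : d < (tl.take (min n 80)).length := by omega
        have h4 : d < tl.length := by omega
        rw [List.getD_eq_getElem _ ' ' h3, List.getD_eq_getElem _ ' ' h4,
          List.getElem_take]
      rw [htake, count_eq n d hd80 hbig]
    · -- n < 80 : A's loop is empty and each of B's residue classes is empty
      have hz : n - 79 = 0 := by omega
      have hmin : min n 80 = n := by omega
      rw [hz, hmin, List.take_length]
      simp only [List.range', List.foldl_nil]
      unfold pvCol
      dsimp only
      have hstart : (tl.length - (if d = 0 then 79 else d + 79) + 79) / 80 = 0 := by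
        split <;> omega
      rw [hstart]
      simp only [List.range', List.foldl_nil]
      exact (Char.ofNat_toNat _).symm

-- ===== VERDICT (by name: the statement is the Claim_ definition above) =====
theorem compactifyTag_spec : Claim_equal_compactifyTag := by
  intro tag _
  show compactifyTag tag = compactifyTag_alt tag
  unfold compactifyTag compactifyTag_alt
  exact congrArg String.ofList (lists_eq tag)
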